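-- pv_equiv track=rewrite | github.com/quocthangtrann/MM_Assignment | bdd_reachability.py | _heuristic_ordering
-- ===== SOURCE A (Python) =====
-- from typing import Tuple, Dict, Any, List, Set
--
-- def _heuristic_ordering(place_ids: List[str], labels: List[str]) -> List[str]:
--     # basic heuristic: if small, keep natural order
--     if len(place_ids) <= 20:
--         return place_ids[:]
--
--     ordered: List[str] = []
--     seen: Set[str] = set()
--
--     # group by numbers appearing in labels (1..N)
--     for i in range(1, 500):
--         group = [pid for pid, lab in zip(place_ids, labels) if lab and str(i) in lab and pid not in seen]
--         if group:
--             group.sort(key=lambda x: labels[place_ids.index(x)])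
--             ordered.extend(group)
--             seen.update(group)
--
--     # common prefixes
--     prefixes = ['FORK', 'EAT', 'THINK', 'WAIT', 'IDLE', 'CRITICAL', 'CS', 'BUF', 'BUFFER',
--                 'READ', 'WRITE', 'PROD', 'CONS', 'TOKEN', 'LOCK', 'MUTEX', 'ENTRY', 'EXIT', 'P']
--     for pref in prefixes:
--         group = [pid for pid, lab in zip(place_ids, labels) if lab and lab.startswith(pref) and pid not in seen]
--         if len(group) >= 2:
--             ordered.extend(group)
--             seen.update(group)
--
--     # remaining
--     remaining = [pid for pid in place_ids if pid not in seen]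
--     remaining.sort(key=lambda x: (labels[place_ids.index(x)] or x))
--     ordered.extend(remaining)
--     return ordered
-- ===== SOURCE B (Python) =====
-- def _heuristic_ordering(place_ids, labels):
--     # basic heuristic: if small, keep natural order
--     if len(place_ids) <= 20:
--         return place_ids[:]
--
--     pairs = list(zip(place_ids, labels))
--     ordered = []
--     seen = set()
--
--     # single pass: bucket each labelled pair under the smallest i in 1..499
--     # whose decimal string occurs in the label
--     buckets = {}
--     for pid, lab in pairs:
--         if lab:
--             for i in range(1, 500):
--                 if str(i) in lab:
--                     buckets.setdefault(i, []).append((pid, lab))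
--                     break
--     for i in sorted(buckets):
--         grp = sorted(buckets[i], key=lambda p: p[1])
--         ordered.extend(p[0] for p in grp)
--         seen.update(p[0] for p in grp)
--
--     # common prefixes
--     prefixes = ['FORK', 'EAT', 'THINK', 'WAIT', 'IDLE', 'CRITICAL', 'CS', 'BUF', 'BUFFER',
--                 'READ', 'WRITE', 'PROD', 'CONS', 'TOKEN', 'LOCK', 'MUTEX', 'ENTRY', 'EXIT', 'P']
--     for pref in prefixes:
--         group = [pid for pid, lab in pairs if lab and lab.startswith(pref) and pid not in seen]
--         if len(group) >= 2:
--             ordered.extend(group)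
--             seen.update(group)
--
--     # remaining, keyed by the pair's own label (or the id for empty labels)
--     rest = sorted([p for p in pairs if p[0] not in seen], key=lambda p: p[1] or p[0])
--     ordered.extend(p[0] for p in rest)
--     return ordered
-- ===== Notes on version B (the rewrite author's own statement) =====
-- stated objective: alternative
-- what changed: The 499 repeated whole-list scans of the number-grouping phase become one bucketing pass (each label is assigned its minimal matching number once, with early break) consumed in ascending key order, and the place_ids.index scans inside the sort keys disappear because B carries (pid,label) pairs throughout.
import Mathlib
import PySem

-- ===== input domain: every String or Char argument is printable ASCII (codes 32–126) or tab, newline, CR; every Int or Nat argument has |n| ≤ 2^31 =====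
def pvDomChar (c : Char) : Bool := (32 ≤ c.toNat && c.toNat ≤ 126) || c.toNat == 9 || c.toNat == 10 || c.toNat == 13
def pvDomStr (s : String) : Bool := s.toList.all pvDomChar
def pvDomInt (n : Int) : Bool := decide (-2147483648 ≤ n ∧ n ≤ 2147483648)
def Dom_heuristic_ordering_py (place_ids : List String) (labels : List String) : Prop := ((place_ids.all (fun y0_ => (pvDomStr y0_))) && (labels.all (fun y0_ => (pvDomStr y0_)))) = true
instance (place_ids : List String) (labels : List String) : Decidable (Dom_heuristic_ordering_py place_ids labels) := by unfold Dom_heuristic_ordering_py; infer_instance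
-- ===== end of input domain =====

-- B replaces A's 499 repeated scans by one bucketing pass per label and drops the
-- repeated `place_ids.index` scans by carrying (pid, label) pairs (objective: alternative).

-- ===== PORT A =====
-- labels[place_ids.index(x)] — exact on Pre_: x ∈ place_ids and its first index is < labels.length
def pvKeyA (place_ids : List String) (labels : List String) (x : String) : String :=
  PySem.List.pyGetD labels (((PySem.List.index? place_ids x).getD 0 : Nat) : Int) ""

def heuristic_ordering_py (place_ids : List String) (labels : List String) : List String :=
  if place_ids.length ≤ 20 then PySem.List.slice place_ids none none
  else
    let st1 := (PySem.List.pyRange 1 500).foldl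
      (fun (st : List String × PySem.Set String) i =>
        let group := ((place_ids.zip labels).filter
          (fun pl => !(pl.2 == "") && PySem.Str.isIn (PySem.Int.toStr i) pl.2
                     && !(PySem.Set.contains st.2 pl.1))).map (·.1)
        if group.isEmpty then st
        else
          let g := PySem.List.sorted group (pvKeyA place_ids labels)
          (st.1 ++ g, PySem.Set.update st.2 g)) ([], PySem.Set.empty)
    let st2 := (["FORK", "EAT", "THINK", "WAIT", "IDLE", "CRITICAL", "CS", "BUF", "BUFFER",
                 "READ", "WRITE", "PROD", "CONS", "TOKEN", "LOCK", "MUTEX", "ENTRY", "EXIT", "P"]).foldl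
      (fun (st : List String × PySem.Set String) pref =>
        let group := ((place_ids.zip labels).filter
          (fun pl => !(pl.2 == "") && PySem.Str.startswith pl.2 pref
                     && !(PySem.Set.contains st.2 pl.1))).map (·.1)
        if 2 ≤ group.length then (st.1 ++ group, PySem.Set.update st.2 group) else st) st1
    let remaining := place_ids.filter (fun pid => !(PySem.Set.contains st2.2 pid))
    st2.1 ++ PySem.List.sorted remaining
      (fun x => if pvKeyA place_ids labels x == "" then x else pvKeyA place_ids labels x)

-- ===== PORT B =====
-- smallest i in 1..499 whose decimal string occurs in lab (the for/break search of Source B)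
def pvMinNum (lab : String) : Option Int :=
  (PySem.List.pyRange 1 500).find? (fun i => PySem.Str.isIn (PySem.Int.toStr i) lab)

def heuristic_ordering_py_alt (place_ids : List String) (labels : List String) : List String :=
  if place_ids.length ≤ 20 then PySem.List.slice place_ids none none
  else
    let pairs := place_ids.zip labels
    let buckets : PySem.Dict Int (List (String × String)) :=
      pairs.foldl (fun d pl =>
        if pl.2 == "" then d
        else match pvMinNum pl.2 with
          | some i => d.modify i [] (· ++ [pl])
          | none => d) PySem.Dict.empty
    let st1 := (PySem.List.sorted (PySem.Dict.keys buckets) (fun x => x)).foldl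
      (fun (st : List String × PySem.Set String) i =>
        let grp := PySem.List.sorted (buckets.getD i []) (fun p => p.2)
        (st.1 ++ grp.map (·.1), PySem.Set.update st.2 (grp.map (·.1)))) ([], PySem.Set.empty)
    let st2 := (["FORK", "EAT", "THINK", "WAIT", "IDLE", "CRITICAL", "CS", "BUF", "BUFFER",
                 "READ", "WRITE", "PROD", "CONS", "TOKEN", "LOCK", "MUTEX", "ENTRY", "EXIT", "P"]).foldl
      (fun (st : List String × PySem.Set String) pref =>
        let group := (pairs.filter
          (fun pl => !(pl.2 == "") && PySem.Str.startswith pl.2 pref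
                     && !(PySem.Set.contains st.2 pl.1))).map (·.1)
        if 2 ≤ group.length then (st.1 ++ group, PySem.Set.update st.2 group) else st) st1
    let rest := PySem.List.sorted (pairs.filter (fun p => !(PySem.Set.contains st2.2 p.1)))
      (fun p => if p.2 == "" then p.1 else p.2)
    st2.1 ++ rest.map (·.1)

-- ===== PRECONDITION & SPEC =====
-- Pre_ excludes inputs with more than 20 place ids that contain duplicate ids (A returns there,
-- but its cross-occurrence seen-dedup and first-occurrence sort keys are accidental tie-breaking
-- of a corner no caller specifies), and inputs with more than 20 place ids where labels is
-- shorter than place_ids (on those, with distinct ids, A raises IndexError in the remaining-sort key).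
def Pre_heuristic_ordering_py (place_ids : List String) (labels : List String) : Prop :=
  place_ids.length ≤ 20 ∨ (place_ids.Nodup ∧ place_ids.length ≤ labels.length)
instance (place_ids : List String) (labels : List String) : Decidable (Pre_heuristic_ordering_py place_ids labels) := by unfold Pre_heuristic_ordering_py; infer_instance

def pvWitness_heuristic_ordering_py : List String × List String := (["a", "b"], ["1", "2"])

def Spec_heuristic_ordering_py (place_ids : List String) (labels : List String) (out : List String) : Prop := out = heuristic_ordering_py_alt place_ids labels
instance (place_ids : List String) (labels : List String) (out : List String) : Decidable (Spec_heuristic_ordering_py place_ids labels out) := by unfold Spec_heuristic_ordering_py; infer_instance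

-- ===== CLAIM (what is proved, stated in full; the proofs are below) =====
def Claim_equal_heuristic_ordering_py : Prop := ∀ (place_ids : List String) (labels : List String), Dom_heuristic_ordering_py place_ids labels → Pre_heuristic_ordering_py place_ids labels → Spec_heuristic_ordering_py place_ids labels (heuristic_ordering_py place_ids labels)

-- ===== LEMMAS AND PROOFS =====

theorem pvInsertBy_map {α β : Type} (f : α → β) (q : β → β → Bool) (x : α) (ys : List α) :
    (PySem.List.insertBy (fun a b => q (f a) (f b)) x ys).map f
      = PySem.List.insertBy q (f x) (ys.map f) := by
  induction ys with
  | nil => simp [PySem.List.insertBy]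
  | cons y t ih =>
    simp only [PySem.List.insertBy, List.map]
    by_cases h : q (f x) (f y)
    · simp [h]
    · simp [h, ih]

theorem pvSorted_map {α β κ : Type} [LT κ] [DecidableLT κ] (f : α → β) (k : β → κ) (l : List α) :
    PySem.List.sorted (l.map f) k = (PySem.List.sorted l (fun x => k (f x))).map f := by
  rw [PySem.List.sorted_eq_foldl_insertBy, PySem.List.sorted_eq_foldl_insertBy, List.foldl_map]
  suffices h : ∀ acc : List α,
      l.foldl (fun acc x => PySem.List.insertBy (fun a b => decide (k a < k b)) (f x) acc) (acc.map f)
        = (l.foldl (fun acc x => PySem.List.insertBy (fun a b => decide (k (f a) < k (f b))) x acc) acc).map f by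
    simpa using h []
  induction l with
  | nil => intro acc; rfl
  | cons y t ih =>
    intro acc
    simp only [List.foldl_cons]
    rw [← pvInsertBy_map f (fun a b => decide (k a < k b)) y acc, ih]

theorem pvInsertBy_congr {α : Type} (q1 q2 : α → α → Bool) (x : α) (ys : List α)
    (h : ∀ a ∈ ys, q1 x a = q2 x a) :
    PySem.List.insertBy q1 x ys = PySem.List.insertBy q2 x ys := by
  induction ys with
  | nil => rfl
  | cons y t ih =>
    simp only [PySem.List.insertBy]
    rw [h y (by simp)]
    by_cases hq : q2 x y
    · simp [hq]
    · simp [hq]; exact ih (fun a ha => h a (by simp [ha]))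

theorem pvSorted_congr {α κ : Type} [LT κ] [DecidableLT κ] (k1 k2 : α → κ) (l : List α)
    (h : ∀ x ∈ l, k1 x = k2 x) :
    PySem.List.sorted l k1 = PySem.List.sorted l k2 := by
  rw [PySem.List.sorted_eq_foldl_insertBy, PySem.List.sorted_eq_foldl_insertBy]
  suffices hgen : ∀ acc : List α, (∀ a ∈ acc, k1 a = k2 a) →
      l.foldl (fun acc x => PySem.List.insertBy (fun a b => decide (k1 a < k1 b)) x acc) acc
        = l.foldl (fun acc x => PySem.List.insertBy (fun a b => decide (k2 a < k2 b)) x acc) acc by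
    exact hgen [] (by simp)
  induction l with
  | nil => intro acc _; rfl
  | cons y t ih =>
    intro acc hacc
    simp only [List.forall_mem_cons] at h
    simp only [List.foldl_cons]
    rw [pvInsertBy_congr (fun a b => decide (k1 a < k1 b)) (fun a b => decide (k2 a < k2 b)) y acc
      (fun a ha => by simp only []; rw [h.1, hacc a ha])]
    exact ih h.2 _ (fun a ha => by
      rcases (PySem.List.mem_insertBy (before := fun a b => decide (k2 a < k2 b)) (x := y) (ys := acc) (y := a)).mp ha with h1 | h1
      · rw [h1]; exact h.1
      · exact hacc a h1)

theorem pvPyRange_pairwise (a b : Int) : (PySem.List.pyRange a b).Pairwise (· < ·) := by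
  by_cases hab : a < b
  · have h : ∀ n : Nat, ∀ a : Int, (b - a).toNat = n → (PySem.List.pyRange a b).Pairwise (· < ·) := by
      intro n
      induction n with
      | zero =>
        intro a ha
        have : ¬ a < b := by omega
        have hnil : PySem.List.pyRange a b = [] := by
          apply List.eq_nil_iff_forall_not_mem.mpr
          intro x hx
          have := PySem.List.mem_pyRange_one.mp hx
          omega
        simp [hnil]
      | succ n ih =>
        intro a ha
        by_cases h' : a < b
        · rw [PySem.List.pyRange_one_cons h']
          refine List.Pairwise.cons ?_ (ih (a + 1) (by omega))
          intro x hx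
          have := PySem.List.mem_pyRange_one.mp hx
          omega
        · have hnil : PySem.List.pyRange a b = [] := by
            apply List.eq_nil_iff_forall_not_mem.mpr
            intro x hx
            have := PySem.List.mem_pyRange_one.mp hx
            omega
          simp [hnil]
    exact h (b - a).toNat a rfl
  · have hnil : PySem.List.pyRange a b = [] := by
      apply List.eq_nil_iff_forall_not_mem.mpr
      intro x hx
      have := PySem.List.mem_pyRange_one.mp hx
      omega
    simp [hnil]

theorem pvFind?_pairwise_eq_some_iff {p : Int → Bool} {l : List Int} (hl : l.Pairwise (· < ·)) (j : Int) :
    l.find? p = some j ↔ j ∈ l ∧ p j = true ∧ ∀ k ∈ l, k < j → p k = false := by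
  induction l with
  | nil => simp
  | cons h t ih =>
    rcases List.pairwise_cons.mp hl with ⟨hht, ht⟩
    rw [List.find?_cons]
    by_cases hp : p h
    · simp only [hp]
      constructor
      · rintro hj
        injection hj with hj; subst hj
        refine ⟨by simp, hp, ?_⟩
        intro k hk hkj
        rcases List.mem_cons.mp hk with rfl | hk
        · omega
        · exact absurd (hht k hk) (by omega)
      · rintro ⟨hj, hpj, hmin⟩
        rcases List.mem_cons.mp hj with rfl | hj
        · rfl
        · have := hmin h (by simp) (hht j hj)
          rw [hp] at this; cases this
    · simp only [Bool.not_eq_true] at hp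
      simp only [hp]
      rw [ih ht]
      constructor
      · rintro ⟨hj, hpj, hmin⟩
        refine ⟨by simp [hj], hpj, ?_⟩
        intro k hk hkj
        rcases List.mem_cons.mp hk with rfl | hk
        · exact hp
        · exact hmin k hk hkj
      · rintro ⟨hj, hpj, hmin⟩
        rcases List.mem_cons.mp hj with rfl | hj
        · rw [hpj] at hp; cases hp
        · exact ⟨hj, hpj, fun k hk hkj => hmin k (by simp [hk]) hkj⟩

theorem pvMinNum_eq_some_iff (lab : String) (j : Int) :
    pvMinNum lab = some j ↔ (1 ≤ j ∧ j < 500) ∧ PySem.Str.isIn (PySem.Int.toStr j) lab = true ∧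
      ∀ k, 1 ≤ k → k < j → PySem.Str.isIn (PySem.Int.toStr k) lab = false := by
  unfold pvMinNum
  rw [pvFind?_pairwise_eq_some_iff (pvPyRange_pairwise 1 500)]
  simp only [PySem.List.mem_pyRange_one]
  constructor
  · rintro ⟨⟨h1, h2⟩, hp, hmin⟩
    exact ⟨⟨h1, h2⟩, hp, fun k hk1 hkj => hmin k ⟨hk1, by omega⟩ hkj⟩
  · rintro ⟨⟨h1, h2⟩, hp, hmin⟩
    exact ⟨⟨h1, h2⟩, hp, fun k hk hkj => hmin k hk.1 hkj⟩

theorem pvCondA_iff (lab : String) (i : Int) (h1 : 1 ≤ i) (h2 : i < 500) :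
    (PySem.Str.isIn (PySem.Int.toStr i) lab = true ∧ ¬ (∃ j, pvMinNum lab = some j ∧ j < i))
      ↔ pvMinNum lab = some i := by
  constructor
  · rintro ⟨hin, hno⟩
    have hsome : (PySem.List.pyRange 1 500).find? (fun k => PySem.Str.isIn (PySem.Int.toStr k) lab) |>.isSome := by
      rw [List.find?_isSome]
      exact ⟨i, PySem.List.mem_pyRange_one.mpr ⟨h1, h2⟩, hin⟩
    rcases Option.isSome_iff_exists.mp hsome with ⟨j, hj⟩
    have hj' := (pvMinNum_eq_some_iff lab j).mp hj
    have hij : ¬ j < i := fun hlt => hno ⟨j, hj, hlt⟩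
    have : ¬ i < j := by
      intro hlt
      have := hj'.2.2 i h1 hlt
      rw [hin] at this; cases this
    have : j = i := by omega
    subst this; exact hj
  · intro hmin
    have h := (pvMinNum_eq_some_iff lab i).mp hmin
    refine ⟨h.2.1, ?_⟩
    rintro ⟨j, hj, hji⟩
    rw [hmin] at hj
    injection hj with hj
    omega

theorem pvPairs_key (place_ids labels : List String) (hnd : place_ids.Nodup)
    (hlen : place_ids.length ≤ labels.length) :
    ∀ p ∈ place_ids.zip labels, pvKeyA place_ids labels p.1 = p.2 := by
  intro p hp
  rcases List.mem_iff_getElem.mp hp with ⟨n, hn, hpn⟩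
  have hnP : n < place_ids.length := by
    have := (List.length_zip (l₁ := place_ids) (l₂ := labels)) ▸ hn
    omega
  have hnL : n < labels.length := by omega
  have hfst : p.1 = place_ids[n] := by rw [← hpn]; simp [List.getElem_zip]
  have hsnd : p.2 = labels[n] := by rw [← hpn]; simp [List.getElem_zip]
  have hidx : PySem.List.index? place_ids p.1 = some n := by
    rw [PySem.List.index?_eq_idxOf?, hfst]
    rw [List.idxOf?_eq_some_iff]
    refine ⟨hnP, rfl, ?_⟩
    intro j hj hje
    exact absurd ((List.Nodup.getElem_inj_iff hnd).mp hje) (by omega)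
  unfold pvKeyA
  rw [hidx]
  simp only [Option.getD_some]
  rw [PySem.List.pyGetD_natCast]
  rw [hsnd, List.getD_eq_getElem _ _ hnL]

theorem pvPairs_inj (place_ids labels : List String) (hnd : place_ids.Nodup) :
    ∀ p ∈ place_ids.zip labels, ∀ q ∈ place_ids.zip labels, p.1 = q.1 → p = q := by
  intro p hp q hq hfst
  rcases List.mem_iff_getElem.mp hp with ⟨n, hn, hpn⟩
  rcases List.mem_iff_getElem.mp hq with ⟨m, hm, hqm⟩
  have hnP : n < place_ids.length := by
    have := (List.length_zip (l₁ := place_ids) (l₂ := labels)) ▸ hn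
    omega
  have hmP : m < place_ids.length := by
    have := (List.length_zip (l₁ := place_ids) (l₂ := labels)) ▸ hm
    omega
  have h1 : place_ids[n] = place_ids[m] := by
    have e1 : p.1 = place_ids[n] := by rw [← hpn]; simp [List.getElem_zip]
    have e2 : q.1 = place_ids[m] := by rw [← hqm]; simp [List.getElem_zip]
    rw [← e1, ← e2, hfst]
  have : n = m := (List.Nodup.getElem_inj_iff hnd).mp h1
  subst this
  rw [← hpn, ← hqm]

def pvBuckets (P L : List String) : PySem.Dict Int (List (String × String)) :=
  (P.zip L).foldl (fun d pl =>
    if pl.2 == "" then d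
    else match pvMinNum pl.2 with
      | some i => d.modify i [] (· ++ [pl])
      | none => d) PySem.Dict.empty

def pvNum (P L : List String) : List (Int × (String × String)) :=
  (P.zip L).filterMap (fun pl => if pl.2 == "" then none else (pvMinNum pl.2).map (fun i => (i, pl)))

set_option maxRecDepth 8192 in
theorem pvBuckets_eq (P L : List String) :
    pvBuckets P L = (pvNum P L).foldl (fun d q => d.modify q.1 [] (· ++ [q.2])) PySem.Dict.empty := by
  unfold pvBuckets pvNum
  suffices h : ∀ (l : List (String × String)) (d : PySem.Dict Int (List (String × String))),
      l.foldl (fun d pl =>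
        if pl.2 == "" then d
        else match pvMinNum pl.2 with
          | some i => d.modify i [] (· ++ [pl])
          | none => d) d
      = (l.filterMap (fun pl => if pl.2 == "" then none else (pvMinNum pl.2).map (fun i => (i, pl)))).foldl
          (fun d q => d.modify q.1 [] (· ++ [q.2])) d by
    exact h _ _
  intro l
  induction l with
  | nil => intro d; rfl
  | cons pl t ih =>
    intro d
    rw [List.foldl_cons, List.filterMap_cons]
    by_cases he : pl.2 = ""
    · rw [if_pos (by simpa using he), if_pos (by simpa using he)]
      exact ih d
    · rw [if_neg (by simpa using he), if_neg (by simpa using he)]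
      cases hm : pvMinNum pl.2 with
      | none => exact ih d
      | some i => exact ih _

theorem pvBuckets_getD (P L : List String) (i : Int) :
    (pvBuckets P L).getD i []
      = (P.zip L).filter (fun pl => !(pl.2 == "") && (pvMinNum pl.2 == some i)) := by
  rw [pvBuckets_eq, PySem.Dict.getD_foldl_modify_append]
  rw [show (PySem.Dict.empty : PySem.Dict Int (List (String × String))).getD i [] = [] from rfl]
  rw [List.nil_append]
  unfold pvNum
  generalize P.zip L = l
  induction l with
  | nil => rfl
  | cons pl t ih =>
    rw [List.filterMap_cons, List.filter_cons]
    by_cases he : pl.2 = ""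
    · rw [if_pos (by simpa using he)]
      have hc : (!(pl.2 == "") && (pvMinNum pl.2 == some i)) = false := by
        simp [he]
      rw [hc, if_neg (by simp)]
      exact ih
    · rw [if_neg (by simpa using he)]
      cases hm : pvMinNum pl.2 with
      | none =>
        rw [show (!(pl.2 == "") && ((none : Option Int) == some i)) = false by simp,
          if_neg (by simp)]
        exact ih
      | some j =>
        by_cases hij : j = i
        · subst hij
          rw [show (!(pl.2 == "") && ((some j : Option Int) == some j)) = true by simp [he],
            if_pos rfl, Option.map_some, List.filter_cons]
          rw [if_pos (by simp), List.map_cons, ih]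
        · rw [show (!(pl.2 == "") && ((some j : Option Int) == some i)) = false by simp [hij],
            if_neg (by simp), Option.map_some, List.filter_cons]
          rw [if_neg (by simp [hij]), ih]

theorem pvBuckets_keys_mem (P L : List String) (i : Int) :
    i ∈ (pvBuckets P L).keys ↔ ∃ pl ∈ P.zip L, ¬ pl.2 = "" ∧ pvMinNum pl.2 = some i := by
  rw [pvBuckets_eq]
  rw [PySem.Dict.keys_foldl_modify_key (pvNum P L) (fun q => q.1) [] (fun _ q => (· ++ [q.2])) PySem.Dict.empty]
  rw [show (PySem.Dict.empty : PySem.Dict Int (List (String × String))).keys = [] from rfl]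
  rw [PySem.Set.update_nil_left]
  rw [PySem.Set.mem_ofList]
  unfold pvNum
  rw [List.mem_map]
  constructor
  · rintro ⟨q, hq, hqi⟩
    rcases List.mem_filterMap.mp hq with ⟨pl, hpl, hg⟩
    by_cases he : pl.2 = ""
    · rw [if_pos (by simpa using he)] at hg; cases hg
    · rw [if_neg (by simpa using he)] at hg
      cases hm : pvMinNum pl.2 with
      | none => rw [hm] at hg; cases hg
      | some j =>
        rw [hm, Option.map_some] at hg
        injection hg with hg
        subst hg
        exact ⟨pl, hpl, he, by rw [hm]; simp at hqi ⊢; rw [hqi]⟩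
  · rintro ⟨pl, hpl, he, hm⟩
    refine ⟨(i, pl), List.mem_filterMap.mpr ⟨pl, hpl, ?_⟩, rfl⟩
    rw [if_neg (by simpa using he), hm, Option.map_some]

theorem pvBuckets_keys_nodup (P L : List String) : (pvBuckets P L).keys.Nodup := by
  rw [pvBuckets_eq]
  rw [PySem.Dict.keys_foldl_modify_key (pvNum P L) (fun q => q.1) [] (fun _ q => (· ++ [q.2])) PySem.Dict.empty]
  rw [show (PySem.Dict.empty : PySem.Dict Int (List (String × String))).keys = [] from rfl]
  rw [PySem.Set.update_nil_left]
  exact PySem.Set.nodup_ofList _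

theorem pvSortedKeys_eq (P L : List String) :
    PySem.List.sorted (PySem.Dict.keys (pvBuckets P L)) (fun x => x)
      = (PySem.List.pyRange 1 500).filter (fun i => (pvBuckets P L).contains i) := by
  apply PySem.List.sorted_eq_of_perm_of_pairwise_lt
  · apply (List.perm_ext_iff_of_nodup ?_ ?_).mpr
    · intro i
      rw [List.mem_filter, PySem.Dict.contains_iff_mem_keys]
      constructor
      · rintro ⟨hr, hk⟩; exact hk
      · intro hk
        refine ⟨?_, hk⟩
        rcases (pvBuckets_keys_mem P L i).mp hk with ⟨pl, _, _, hm⟩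
        have := (pvMinNum_eq_some_iff pl.2 i).mp hm
        exact PySem.List.mem_pyRange_one.mpr ⟨this.1.1, this.1.2⟩
    · exact List.filter_sublist.nodup (pvPyRange_pairwise 1 500).nodup
    · exact pvBuckets_keys_nodup P L
  · exact (pvPyRange_pairwise 1 500).sublist List.filter_sublist

theorem pvFoldl_filter_id {α β : Type} (l : List α) (p : α → Bool) (f : β → α → β) (init : β)
    (h : ∀ acc, ∀ x ∈ l, p x = false → f acc x = acc) :
    (l.filter p).foldl f init = l.foldl f init := by
  induction l generalizing init with
  | nil => rfl
  | cons x t ih =>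
    rw [List.filter_cons]
    by_cases hp : p x
    · rw [if_pos (by simp [hp]), List.foldl_cons, List.foldl_cons]
      exact ih _ (fun acc y hy hpy => h acc y (by simp [hy]) hpy)
    · rw [if_neg (by simpa using hp), List.foldl_cons]
      rw [h init x (by simp) (by simpa using hp)]
      exact ih _ (fun acc y hy hpy => h acc y (by simp [hy]) hpy)

theorem pvToStr_ne_empty (j : Int) : (PySem.Int.toStr j).toList ≠ [] := by
  rw [PySem.Int.toList_toStr]
  unfold PySem.Int.toChars
  split
  · simp
  · have := Nat.length_toDigits_pos (b := 10) (n := j.toNat)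
    intro h
    rw [h] at this
    simp at this

theorem pvMinNum_some_ne (lab : String) (j : Int) (h : pvMinNum lab = some j) : ¬ lab = "" := by
  intro he
  subst he
  have h2 := ((pvMinNum_eq_some_iff _ j).mp h).2.1
  rw [PySem.Str.isIn_iff_infix] at h2
  have hsub := h2.sublist
  rw [show ("" : String).toList = [] from rfl] at hsub
  exact pvToStr_ne_empty j (List.sublist_nil.mp hsub)

def pvStepA (P L : List String) (st : List String × PySem.Set String) (i : Int) :
    List String × PySem.Set String :=
  let group := ((P.zip L).filter
    (fun pl => !(pl.2 == "") && PySem.Str.isIn (PySem.Int.toStr i) pl.2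
               && !(PySem.Set.contains st.2 pl.1))).map (·.1)
  if group.isEmpty then st
  else
    let g := PySem.List.sorted group (pvKeyA P L)
    (st.1 ++ g, PySem.Set.update st.2 g)

def pvStepB (P L : List String) (st : List String × PySem.Set String) (i : Int) :
    List String × PySem.Set String :=
  let grp := PySem.List.sorted ((pvBuckets P L).getD i []) (fun p => p.2)
  (st.1 ++ grp.map (·.1), PySem.Set.update st.2 (grp.map (·.1)))

theorem pvPhase1 (P L : List String) (hnd : P.Nodup) (hlen : P.length ≤ L.length) :
    ∀ m : Nat, m ≤ 499 →
      ((PySem.List.pyRange 1 ((m : Int) + 1)).foldl (pvStepA P L) ([], PySem.Set.empty)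
        = (PySem.List.pyRange 1 ((m : Int) + 1)).foldl (pvStepB P L) ([], PySem.Set.empty))
      ∧ ∀ pid, (pid ∈ ((PySem.List.pyRange 1 ((m : Int) + 1)).foldl (pvStepA P L) ([], PySem.Set.empty)).2
          ↔ ∃ pl ∈ P.zip L, pl.1 = pid ∧ ∃ j, pvMinNum pl.2 = some j ∧ j < (m : Int) + 1) := by
  intro m
  induction m with
  | zero =>
    intro _
    constructor
    · rfl
    · intro pid
      simp only [Nat.cast_zero]
      rw [show PySem.List.pyRange 1 ((0 : Int) + 1) = [] from rfl]
      simp only [List.foldl_nil]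
      constructor
      · intro h; cases h
      · rintro ⟨pl, _, _, j, hj, hjlt⟩
        have := ((pvMinNum_eq_some_iff _ j).mp hj).1.1
        omega
  | succ m ih =>
    intro hm1
    rcases ih (by omega) with ⟨hst, hchar⟩
    set i : Int := (m : Int) + 1 with hidef
    have hrange : PySem.List.pyRange 1 (((m + 1 : Nat) : Int) + 1)
        = PySem.List.pyRange 1 ((m : Int) + 1) ++ [i] := by
      push_cast
      rw [show ((m : Int) + 1 + 1) = ((m : Int) + 1) + 1 by ring]
      exact PySem.List.pyRange_one_succ_right (by omega)
    have h1i : 1 ≤ i := by omega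
    have h2i : i < 500 := by omega
    rw [hrange, List.foldl_append, List.foldl_append]
    simp only [List.foldl_cons, List.foldl_nil]
    set sA := (PySem.List.pyRange 1 ((m : Int) + 1)).foldl (pvStepA P L) ([], PySem.Set.empty) with hsA
    rw [← hst]
    -- seen membership at threshold i, specialised per pair
    have hseen : ∀ pl ∈ P.zip L, (PySem.Set.contains sA.2 pl.1 = true ↔ ∃ j, pvMinNum pl.2 = some j ∧ j < i) := by
      intro pl hpl
      rw [PySem.Set.contains_iff, hchar pl.1]
      constructor
      · rintro ⟨pl', hpl', hfst, j, hj, hjlt⟩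
        have : pl' = pl := pvPairs_inj P L hnd pl' hpl' pl hpl hfst
        subst this
        exact ⟨j, hj, hjlt⟩
      · rintro ⟨j, hj, hjlt⟩
        exact ⟨pl, hpl, rfl, j, hj, hjlt⟩
    -- the two filters agree
    have hfilter : (P.zip L).filter
        (fun pl => !(pl.2 == "") && PySem.Str.isIn (PySem.Int.toStr i) pl.2
                   && !(PySem.Set.contains sA.2 pl.1))
        = (P.zip L).filter (fun pl => !(pl.2 == "") && (pvMinNum pl.2 == some i)) := by
      apply List.filter_congr
      intro pl hpl
      rw [Bool.eq_iff_iff]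
      simp only [Bool.and_eq_true, Bool.not_eq_true', beq_eq_false_iff_ne, ne_eq, beq_iff_eq]
      have hs := hseen pl hpl
      have hsF : PySem.Set.contains sA.2 pl.1 = false ↔ ¬ ∃ j, pvMinNum pl.2 = some j ∧ j < i := by
        rw [← hs]
        cases PySem.Set.contains sA.2 pl.1 <;> simp
      constructor
      · rintro ⟨⟨hne, hin⟩, hcf⟩
        exact ⟨hne, (pvCondA_iff pl.2 i h1i h2i).mp ⟨hin, hsF.mp hcf⟩⟩
      · rintro ⟨hne, hmin⟩
        rcases (pvCondA_iff pl.2 i h1i h2i).mpr hmin with ⟨hin, hno⟩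
        exact ⟨⟨hne, hin⟩, hsF.mpr hno⟩
    have hbucket : (pvBuckets P L).getD i []
        = (P.zip L).filter (fun pl => !(pl.2 == "") && (pvMinNum pl.2 == some i)) :=
      pvBuckets_getD P L i
    have hkeys : ∀ pl ∈ (P.zip L).filter (fun pl => !(pl.2 == "") && (pvMinNum pl.2 == some i)),
        pvKeyA P L pl.1 = pl.2 := by
      intro pl hpl
      exact pvPairs_key P L hnd hlen pl (List.mem_of_mem_filter hpl)
    have hsorted : PySem.List.sorted
          (((P.zip L).filter (fun pl => !(pl.2 == "") && (pvMinNum pl.2 == some i))).map (·.1))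
          (pvKeyA P L)
        = (PySem.List.sorted
            ((P.zip L).filter (fun pl => !(pl.2 == "") && (pvMinNum pl.2 == some i)))
            (fun p => p.2)).map (·.1) := by
      rw [pvSorted_map]
      congr 1
      exact pvSorted_congr _ _ _ (fun pl hpl => hkeys pl hpl)
    have hstep : pvStepA P L sA i = pvStepB P L sA i := by
      unfold pvStepA pvStepB
      simp only [hfilter, hbucket]
      by_cases hgE : (((P.zip L).filter (fun pl => !(pl.2 == "") && (pvMinNum pl.2 == some i))).map (·.1)).isEmpty
      · have hBnil : (P.zip L).filter (fun pl => !(pl.2 == "") && (pvMinNum pl.2 == some i)) = [] := by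
          rcases List.isEmpty_iff.mp hgE with h
          exact List.map_eq_nil_iff.mp h
        rw [if_pos hgE, hBnil]
        rw [show PySem.List.sorted ([] : List (String × String)) (fun p => p.2) = [] from rfl]
        simp
      · rw [if_neg hgE, hsorted]
    refine ⟨hstep, ?_⟩
    intro pid
    rw [hstep]
    unfold pvStepB
    simp only [hbucket]
    rw [PySem.Set.mem_update]
    have hmem : pid ∈ (PySem.List.sorted
          ((P.zip L).filter (fun pl => !(pl.2 == "") && (pvMinNum pl.2 == some i)))
          (fun p => p.2)).map (·.1)
        ↔ ∃ pl ∈ P.zip L, pl.1 = pid ∧ pvMinNum pl.2 = some i := by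
      rw [List.mem_map]
      constructor
      · rintro ⟨pl, hpl, hfst⟩
        rw [PySem.List.mem_sorted] at hpl
        rcases List.mem_filter.mp hpl with ⟨hplz, hcond⟩
        simp only [Bool.and_eq_true, beq_iff_eq] at hcond
        exact ⟨pl, hplz, hfst, hcond.2⟩
      · rintro ⟨pl, hplz, hfst, hmin⟩
        refine ⟨pl, ?_, hfst⟩
        rw [PySem.List.mem_sorted]
        refine List.mem_filter.mpr ⟨hplz, ?_⟩
        simp only [Bool.and_eq_true, beq_iff_eq]
        exact ⟨by simpa using pvMinNum_some_ne pl.2 i hmin, hmin⟩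
    rw [hmem, hchar pid]
    push_cast
    constructor
    · rintro (⟨pl, hplz, hfst, j, hj, hjlt⟩ | ⟨pl, hplz, hfst, hmin⟩)
      · exact ⟨pl, hplz, hfst, j, hj, by omega⟩
      · exact ⟨pl, hplz, hfst, i, hmin, by omega⟩
    · rintro ⟨pl, hplz, hfst, j, hj, hjlt⟩
      by_cases hji : j < i
      · exact Or.inl ⟨pl, hplz, hfst, j, hj, hji⟩
      · have : j = i := by omega
        subst this
        exact Or.inr ⟨pl, hplz, hfst, hj⟩



theorem pvPhase1Final (P L : List String) (hnd : P.Nodup) (hlen : P.length ≤ L.length) :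
    (PySem.List.pyRange 1 500).foldl (pvStepA P L) ([], PySem.Set.empty)
      = (PySem.List.pyRange 1 500).foldl (pvStepB P L) ([], PySem.Set.empty) := by
  have h := (pvPhase1 P L hnd hlen 499 (by norm_num)).1
  norm_num at h
  exact h

theorem pvAltFoldKeys (P L : List String) :
    (PySem.List.sorted (PySem.Dict.keys (pvBuckets P L)) (fun x => x)).foldl (pvStepB P L) ([], PySem.Set.empty)
      = (PySem.List.pyRange 1 500).foldl (pvStepB P L) ([], PySem.Set.empty) := by
  rw [pvSortedKeys_eq]
  apply pvFoldl_filter_id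
  intro acc x hx hcf
  have h0 : (pvBuckets P L).getD x [] = [] :=
    PySem.Dict.getD_of_not_contains _ _ hcf
  simp only [pvStepB, h0]
  rw [show PySem.List.sorted ([] : List (String × String)) (fun p => p.2) = [] from rfl]
  simp

-- the prefix-phase step, shared verbatim by both ports
def pvStepP (P L : List String) (st : List String × PySem.Set String) (pref : String) :
    List String × PySem.Set String :=
  let group := ((P.zip L).filter
    (fun pl => !(pl.2 == "") && PySem.Str.startswith pl.2 pref
               && !(PySem.Set.contains st.2 pl.1))).map (·.1)
  if 2 ≤ group.length then (st.1 ++ group, PySem.Set.update st.2 group) else st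

def pvP2 (P L : List String) (st1 : List String × PySem.Set String) :
    List String × PySem.Set String :=
  (["FORK", "EAT", "THINK", "WAIT", "IDLE", "CRITICAL", "CS", "BUF", "BUFFER",
    "READ", "WRITE", "PROD", "CONS", "TOKEN", "LOCK", "MUTEX", "ENTRY", "EXIT", "P"]).foldl
    (pvStepP P L) st1

def pvTail (P L : List String) (st1 : List String × PySem.Set String) : List String :=
  (pvP2 P L st1).1 ++ PySem.List.sorted
    (P.filter (fun pid => !(PySem.Set.contains (pvP2 P L st1).2 pid)))
    (fun x => if pvKeyA P L x == "" then x else pvKeyA P L x)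

def pvTailB (P L : List String) (st1 : List String × PySem.Set String) : List String :=
  (pvP2 P L st1).1 ++ (PySem.List.sorted
    ((P.zip L).filter (fun p => !(PySem.Set.contains (pvP2 P L st1).2 p.1)))
    (fun p => if p.2 == "" then p.1 else p.2)).map (·.1)

theorem pvPortA_eq (P L : List String) (h20 : ¬ P.length ≤ 20) :
    heuristic_ordering_py P L
      = pvTail P L ((PySem.List.pyRange 1 500).foldl (pvStepA P L) ([], PySem.Set.empty)) := by
  unfold heuristic_ordering_py
  rw [if_neg h20]
  rfl

theorem pvPortB_eq (P L : List String) (h20 : ¬ P.length ≤ 20) :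
    heuristic_ordering_py_alt P L
      = pvTailB P L ((PySem.List.sorted (PySem.Dict.keys (pvBuckets P L)) (fun x => x)).foldl
          (pvStepB P L) ([], PySem.Set.empty)) := by
  unfold heuristic_ordering_py_alt
  rw [if_neg h20]
  rfl

theorem pvTail_eq (P L : List String) (hnd : P.Nodup) (hlen : P.length ≤ L.length)
    (st1 : List String × PySem.Set String) : pvTail P L st1 = pvTailB P L st1 := by
  unfold pvTail pvTailB
  generalize pvP2 P L st1 = st2
  congr 1
  have hfil : P.filter (fun pid => !(PySem.Set.contains st2.2 pid))
      = ((P.zip L).filter (fun p => !(PySem.Set.contains st2.2 p.1))).map (·.1) := by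
    conv_lhs => rw [← List.map_fst_zip hlen]
    rw [List.filter_map]
    rfl
  rw [hfil, pvSorted_map]
  congr 1
  apply pvSorted_congr
  intro pl hpl
  have hk := pvPairs_key P L hnd hlen pl (List.mem_of_mem_filter hpl)
  simp only [hk]

theorem pvMain (P L : List String) (hpre : Pre_heuristic_ordering_py P L) :
    heuristic_ordering_py P L = heuristic_ordering_py_alt P L := by
  by_cases h20 : P.length ≤ 20
  · unfold heuristic_ordering_py heuristic_ordering_py_alt
    rw [if_pos h20, if_pos h20]
  · rcases hpre with h | ⟨hnd, hlen⟩
    · exact absurd h h20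
    rw [pvPortA_eq P L h20, pvPortB_eq P L h20, pvAltFoldKeys, ← pvPhase1Final P L hnd hlen]
    exact pvTail_eq P L hnd hlen _

-- ===== VERDICT (by name: the statement is the Claim_ definition above) =====
theorem heuristic_ordering_py_spec : Claim_equal_heuristic_ordering_py := by
  intro place_ids labels _ hpre
  unfold Spec_heuristic_ordering_py
  exact pvMain place_ids labels hpre
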